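-- pv_equiv track=rewrite | github.com/ToyotaCRDL/lchs-for-pde | lib/utils.py | resolve_conflicts
-- ===== SOURCE A (Python) =====
-- def resolve_conflicts(bits1, bits2, coeff):
--     # resolve the bits counted both in bits1 and bits2
--     # by modifying the string bits1
--     bits_diff = []
--     bits1_arbit = []
--     bits2_arbit = []
--     for i, (b1, b2) in enumerate(zip(bits1, bits2)):
--         if b1 == '-' or b2 == '-':
--             if b1 == '-':
--                 bits1_arbit.append(i)
--             if b2 == '-':
--                 bits2_arbit.append(i)
--         elif b1 != b2:
--             bits_diff.append(i)
--
--     # check duplication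
--     if len(bits_diff) == 0:
--         for i in bits1_arbit:
--             if i not in bits2_arbit:
--                 if bits2[i] == '0':
--                     b_mod = '1'
--                 else:
--                     b_mod = '0'
--                 bits1 = bits1[:i] + b_mod + bits1[i+1:]
--                 return bits1, bits2, coeff
--
--         for i in bits2_arbit:
--             if i not in bits1_arbit:
--                 if bits1[i] == '0':
--                     b_mod = '1'
--                 else:
--                     b_mod = '0'
--                 bits1 = bits1[:i] + b_mod + bits1[i+1:]
--                 return bits1, bits2, -1*coeff
--
--         return bits1, bits2, 0
--
--     return bits1, bits2, coeff
-- ===== SOURCE B (Python) =====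
-- def resolve_conflicts(bits1, bits2, coeff):
--     # Single pass: track whether any hard conflict exists and the first
--     # one-sided '-' position on each side; no index lists, no re-scans.
--     has_diff = False
--     first1 = None
--     first2 = None
--     for i, (b1, b2) in enumerate(zip(bits1, bits2)):
--         if b1 == '-':
--             if b2 != '-' and first1 is None:
--                 first1 = i
--         elif b2 == '-':
--             if first2 is None:
--                 first2 = i
--         elif b1 != b2:
--             has_diff = True
--     if has_diff:
--         return bits1, bits2, coeff
--     if first1 is not None:
--         i = first1
--         b_mod = '1' if bits2[i] == '0' else '0'
--         return bits1[:i] + b_mod + bits1[i+1:], bits2, coeff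
--     if first2 is not None:
--         i = first2
--         b_mod = '1' if bits1[i] == '0' else '0'
--         return bits1[:i] + b_mod + bits1[i+1:], bits2, -1*coeff
--     return bits1, bits2, 0
-- ===== Notes on version B (the rewrite author's own statement) =====
-- stated objective: simpler
-- what changed: Replaces A's three accumulated index lists and the membership re-scans over them by a single pass over zip(bits1,bits2) that keeps one has_diff flag and the first one-sided '-' index on each side.
import Mathlib
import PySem

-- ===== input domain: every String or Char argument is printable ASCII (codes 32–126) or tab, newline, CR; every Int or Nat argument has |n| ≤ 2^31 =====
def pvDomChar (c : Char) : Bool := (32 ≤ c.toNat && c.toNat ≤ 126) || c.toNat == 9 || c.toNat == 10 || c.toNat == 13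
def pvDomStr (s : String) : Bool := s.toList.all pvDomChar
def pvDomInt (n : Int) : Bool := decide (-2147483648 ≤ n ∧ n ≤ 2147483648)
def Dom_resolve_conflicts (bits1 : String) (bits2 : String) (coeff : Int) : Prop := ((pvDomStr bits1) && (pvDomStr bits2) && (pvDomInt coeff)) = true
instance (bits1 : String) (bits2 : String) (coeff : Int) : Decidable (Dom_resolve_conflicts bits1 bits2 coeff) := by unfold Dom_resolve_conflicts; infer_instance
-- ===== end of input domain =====

-- B replaces A's three index lists and membership re-scans by a single pass keeping
-- one flag and two first-occurrence indices (objective: simpler; same asymptotics measured).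

-- ===== PORT A =====
-- Python's enumerate(zip(bits1, bits2)) (indices as Nat: enumerate always starts at 0 here)
def pvEnum {α : Type} (k : Nat) : List α → List (Nat × α)
  | [] => []
  | a :: l => (k, a) :: pvEnum (k + 1) l

-- first for-loop with early return: "for i in bits1_arbit: if i not in bits2_arbit: …"
-- bits1[:i] + b_mod + bits1[i+1:] is l1.take i ++ [b_mod] ++ l1.drop (i+1) (0 ≤ i < len, exact)
def pvLoop1A (l1 l2 : List Char) (bits2 : String) (coeff : Int) :
    List Nat → List Nat → Option (String × String × Int)
  | [], _ => none
  | i :: rest, a2 =>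
    if i ∈ a2 then pvLoop1A l1 l2 bits2 coeff rest a2
    else some (String.ofList (l1.take i ++ [if l2.getD i ' ' = '0' then '1' else '0'] ++ l1.drop (i + 1)),
               bits2, coeff)

-- second for-loop: "for i in bits2_arbit: if i not in bits1_arbit: …" (flip source bits1, sign -1*coeff)
def pvLoop2A (l1 l2 : List Char) (bits2 : String) (coeff : Int) :
    List Nat → List Nat → Option (String × String × Int)
  | [], _ => none
  | i :: rest, a1 =>
    if i ∈ a1 then pvLoop2A l1 l2 bits2 coeff rest a1
    else some (String.ofList (l1.take i ++ [if l1.getD i ' ' = '0' then '1' else '0'] ++ l1.drop (i + 1)),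
               bits2, -1 * coeff)

def pvStepA (st : List Nat × List Nat × List Nat) (x : Nat × Char × Char) :
    List Nat × List Nat × List Nat :=
  if x.2.1 = '-' ∨ x.2.2 = '-' then
    (st.1, (if x.2.1 = '-' then st.2.1 ++ [x.1] else st.2.1),
           (if x.2.2 = '-' then st.2.2 ++ [x.1] else st.2.2))
  else if x.2.1 ≠ x.2.2 then (st.1 ++ [x.1], st.2.1, st.2.2)
  else st

def resolve_conflicts (bits1 : String) (bits2 : String) (coeff : Int) : String × String × Int :=
  let l1 := bits1.toList
  let l2 := bits2.toList
  let st := (pvEnum 0 (l1.zip l2)).foldl pvStepA ([], [], [])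
  if st.1.length = 0 then
    match pvLoop1A l1 l2 bits2 coeff st.2.1 st.2.2 with
    | some r => r
    | none =>
      match pvLoop2A l1 l2 bits2 coeff st.2.2 st.2.1 with
      | some r => r
      | none => (bits1, bits2, 0)
  else (bits1, bits2, coeff)

-- ===== PORT B =====
def pvStepB (st : Bool × Option Nat × Option Nat) (x : Nat × Char × Char) :
    Bool × Option Nat × Option Nat :=
  if x.2.1 = '-' then
    (if x.2.2 ≠ '-' ∧ st.2.1 = none then (st.1, some x.1, st.2.2) else st)
  else if x.2.2 = '-' then
    (if st.2.2 = none then (st.1, st.2.1, some x.1) else st)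
  else if x.2.1 ≠ x.2.2 then (true, st.2.1, st.2.2)
  else st

def resolve_conflicts_alt (bits1 : String) (bits2 : String) (coeff : Int) : String × String × Int :=
  let l1 := bits1.toList
  let l2 := bits2.toList
  let st := (pvEnum 0 (l1.zip l2)).foldl pvStepB (false, none, none)
  if st.1 then (bits1, bits2, coeff)
  else
    match st.2.1 with
    | some i =>
      (String.ofList (l1.take i ++ [if l2.getD i ' ' = '0' then '1' else '0'] ++ l1.drop (i + 1)),
       bits2, coeff)
    | none =>
      match st.2.2 with
      | some i =>
        (String.ofList (l1.take i ++ [if l1.getD i ' ' = '0' then '1' else '0'] ++ l1.drop (i + 1)),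
         bits2, -1 * coeff)
      | none => (bits1, bits2, 0)

-- ===== PRECONDITION & SPEC =====
def Spec_resolve_conflicts (bits1 : String) (bits2 : String) (coeff : Int) (out : String × String × Int) : Prop := out = resolve_conflicts_alt bits1 bits2 coeff
instance (bits1 : String) (bits2 : String) (coeff : Int) (out : String × String × Int) : Decidable (Spec_resolve_conflicts bits1 bits2 coeff out) := by unfold Spec_resolve_conflicts; infer_instance

-- ===== CLAIM (what is proved, stated in full; the proofs are below) =====
def Claim_equal_resolve_conflicts : Prop := ∀ (bits1 : String) (bits2 : String) (coeff : Int), Dom_resolve_conflicts bits1 bits2 coeff → Spec_resolve_conflicts bits1 bits2 coeff (resolve_conflicts bits1 bits2 coeff)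

-- ===== LEMMAS AND PROOFS =====

-- selectors used in the characterisations
def pvG1 (x : Nat × Char × Char) : Option Nat := if x.2.1 = '-' then some x.1 else none
def pvG2 (x : Nat × Char × Char) : Option Nat := if x.2.2 = '-' then some x.1 else none
def pvGd (x : Nat × Char × Char) : Option Nat :=
  if ¬ (x.2.1 = '-' ∨ x.2.2 = '-') ∧ x.2.1 ≠ x.2.2 then some x.1 else none
def pvQ1 (x : Nat × Char × Char) : Bool := decide (x.2.1 = '-') && !(decide (x.2.2 = '-'))
def pvQ2 (x : Nat × Char × Char) : Bool := !(decide (x.2.1 = '-')) && decide (x.2.2 = '-')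
def pvPd (x : Nat × Char × Char) : Bool :=
  !(decide (x.2.1 = '-')) && !(decide (x.2.2 = '-')) && decide (x.2.1 ≠ x.2.2)

lemma foldA_char (l : List (Nat × Char × Char)) :
    ∀ d a1 a2, l.foldl pvStepA (d, a1, a2)
      = (d ++ l.filterMap pvGd, a1 ++ l.filterMap pvG1, a2 ++ l.filterMap pvG2) := by
  induction l with
  | nil => intro d a1 a2; simp
  | cons x l ih =>
    intro d a1 a2
    simp only [List.foldl_cons, List.filterMap_cons, pvStepA, pvGd, pvG1, pvG2]
    by_cases h1 : x.2.1 = '-' <;> by_cases h2 : x.2.2 = '-' <;>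
      by_cases hd : x.2.1 = x.2.2 <;>
      simp [h1, h2, hd, ih, pvGd, pvG1, pvG2]

lemma foldB_char (l : List (Nat × Char × Char)) :
    ∀ h o1 o2, l.foldl pvStepB (h, o1, o2)
      = (h || l.any pvPd,
         (match o1 with | some a => some a | none => (l.find? pvQ1).map Prod.fst),
         (match o2 with | some a => some a | none => (l.find? pvQ2).map Prod.fst)) := by
  induction l with
  | nil => intro h o1 o2; cases o1 <;> cases o2 <;> simp
  | cons x l ih =>
    intro h o1 o2
    simp only [List.foldl_cons, pvStepB, List.any_cons, List.find?_cons, pvQ1, pvQ2, pvPd]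
    by_cases h1 : x.2.1 = '-' <;> by_cases h2 : x.2.2 = '-' <;>
      by_cases hd : x.2.1 = x.2.2 <;> cases o1 <;> cases o2 <;>
      simp [h1, h2, hd, ih, pvQ1, pvQ2, pvPd]

lemma mem_pvEnum_le {α : Type} {l : List α} {k : Nat} {p : Nat × α} (h : p ∈ pvEnum k l) :
    k ≤ p.1 := by
  induction l generalizing k with
  | nil => simp [pvEnum] at h
  | cons a l ih =>
    simp only [pvEnum, List.mem_cons] at h
    rcases h with h | h
    · simp [h]
    · exact Nat.le_of_succ_le (ih h)

lemma mem_filterMap_sel_le {c : Char × Char → Bool} {l : List (Char × Char)} {k i : Nat}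
    (h : i ∈ (pvEnum k l).filterMap (fun x => if c x.2 then some x.1 else none)) : k ≤ i := by
  rcases List.mem_filterMap.1 h with ⟨x, hx, hc⟩
  split at hc
  · cases hc; exact mem_pvEnum_le hx
  · cases hc

lemma find?_congr_mem {α : Type} {p q : α → Bool} : ∀ {l : List α},
    (∀ a ∈ l, p a = q a) → l.find? p = l.find? q := by
  intro l h
  induction l with
  | nil => rfl
  | cons a l ih =>
    have ha := h a (List.mem_cons_self ..)
    simp only [List.find?_cons, ha]
    cases hq : q a
    · simp [ih (fun b hb => h b (List.mem_cons_of_mem _ hb))]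
    · rfl

-- the key lemma: first element of a1 not in a2 = first index satisfying c1 && !c2
lemma key_find (c1 c2 : Char × Char → Bool) : ∀ (l : List (Char × Char)) (k : Nat),
    ((pvEnum k l).filterMap (fun (x : Nat × Char × Char) => if c1 x.2 then some x.1 else none)).find?
        (fun i => !(((pvEnum k l).filterMap (fun (x : Nat × Char × Char) => if c2 x.2 then some x.1 else none)).contains i))
      = ((pvEnum k l).find? (fun (x : Nat × Char × Char) => c1 x.2 && !(c2 x.2))).map Prod.fst := by
  intro l
  induction l with
  | nil => intro k; simp [pvEnum]
  | cons b l ih =>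
    intro k
    have hgt : ∀ g : Char × Char → Bool, ∀ i ∈ (pvEnum (k+1) l).filterMap
        (fun x => if g x.2 then some x.1 else none), i ≠ k := by
      intro g i hi hik
      have := mem_filterMap_sel_le (c := g) hi
      omega
    have hcongr : ((pvEnum (k+1) l).filterMap (fun (x : Nat × Char × Char) => if c1 x.2 then some x.1 else none)).find?
        (fun i => !((k :: (pvEnum (k+1) l).filterMap (fun (x : Nat × Char × Char) => if c2 x.2 then some x.1 else none)).contains i))
        = ((pvEnum (k+1) l).filterMap (fun (x : Nat × Char × Char) => if c1 x.2 then some x.1 else none)).find?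
        (fun i => !(((pvEnum (k+1) l).filterMap (fun (x : Nat × Char × Char) => if c2 x.2 then some x.1 else none)).contains i)) := by
      apply find?_congr_mem
      intro i hi
      have := hgt c1 i hi
      simp [List.contains_cons, this]
    have hk2 : ¬ ((List.filterMap (fun (x : Nat × Char × Char) => if c2 x.2 then some x.1 else none) (pvEnum (k+1) l)).contains k) = true := by
      intro hc
      exact hgt c2 k (by simpa using hc) rfl
    simp only [pvEnum]
    by_cases h1 : c1 b = true <;> by_cases h2 : c2 b = true
    · rw [List.filterMap_cons_some (f := (fun (x : Nat × Char × Char) => if c1 x.2 then some x.1 else none)) (b := k) (by simp [h1]),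
          List.filterMap_cons_some (f := (fun (x : Nat × Char × Char) => if c2 x.2 then some x.1 else none)) (b := k) (by simp [h2]),
          List.find?_cons_of_neg (p := fun i => !((k :: (List.filterMap (fun (x : Nat × Char × Char) => if c2 x.2 then some x.1 else none) (pvEnum (k+1) l))).contains i)) (by simp),
          List.find?_cons_of_neg (p := fun (x : Nat × Char × Char) => c1 x.2 && !(c2 x.2)) (by simp [h1, h2]),
          hcongr, ih]
    · rw [List.filterMap_cons_some (f := (fun (x : Nat × Char × Char) => if c1 x.2 then some x.1 else none)) (b := k) (by simp [h1]),
          List.filterMap_cons_none (f := (fun (x : Nat × Char × Char) => if c2 x.2 then some x.1 else none)) (by simp [h2]),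
          List.find?_cons_of_pos (p := fun i => !((List.filterMap (fun (x : Nat × Char × Char) => if c2 x.2 then some x.1 else none) (pvEnum (k+1) l)).contains i)) (by simpa using hk2),
          List.find?_cons_of_pos (p := fun (x : Nat × Char × Char) => c1 x.2 && !(c2 x.2)) (by simp [h1, h2]),
          Option.map_some]
    · rw [List.filterMap_cons_none (f := (fun (x : Nat × Char × Char) => if c1 x.2 then some x.1 else none)) (by simp [h1]),
          List.filterMap_cons_some (f := (fun (x : Nat × Char × Char) => if c2 x.2 then some x.1 else none)) (b := k) (by simp [h2]),
          List.find?_cons_of_neg (p := fun (x : Nat × Char × Char) => c1 x.2 && !(c2 x.2)) (by simp [h1]),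
          hcongr, ih]
    · rw [List.filterMap_cons_none (f := (fun (x : Nat × Char × Char) => if c1 x.2 then some x.1 else none)) (by simp [h1]),
          List.filterMap_cons_none (f := (fun (x : Nat × Char × Char) => if c2 x.2 then some x.1 else none)) (by simp [h2]),
          List.find?_cons_of_neg (p := fun (x : Nat × Char × Char) => c1 x.2 && !(c2 x.2)) (by simp [h1]),
          ih]

lemma key1 (l : List (Char × Char)) :
    ((pvEnum 0 l).filterMap pvG1).find? (fun i => !(((pvEnum 0 l).filterMap pvG2).contains i))
      = ((pvEnum 0 l).find? pvQ1).map Prod.fst := by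
  have h := key_find (fun p => decide (p.1 = '-')) (fun p => decide (p.2 = '-')) l 0
  simpa [pvG1, pvG2, pvQ1] using h

lemma key2 (l : List (Char × Char)) :
    ((pvEnum 0 l).filterMap pvG2).find? (fun i => !(((pvEnum 0 l).filterMap pvG1).contains i))
      = ((pvEnum 0 l).find? pvQ2).map Prod.fst := by
  have h := key_find (fun p => decide (p.2 = '-')) (fun p => decide (p.1 = '-')) l 0
  simpa [pvG1, pvG2, pvQ2, Bool.and_comm] using h

lemma loop1_eq_find (l1 l2 : List Char) (b2s : String) (c : Int) :
    ∀ a1 a2, pvLoop1A l1 l2 b2s c a1 a2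
      = (a1.find? (fun i => !(a2.contains i))).map
          (fun i => (String.ofList (l1.take i ++ [if l2.getD i ' ' = '0' then '1' else '0'] ++ l1.drop (i + 1)), b2s, c)) := by
  intro a1
  induction a1 with
  | nil => intro a2; simp [pvLoop1A]
  | cons i rest ih =>
    intro a2
    simp only [pvLoop1A, List.find?_cons]
    by_cases h : i ∈ a2 <;> simp [h, ih]

lemma loop2_eq_find (l1 l2 : List Char) (b2s : String) (c : Int) :
    ∀ a2 a1, pvLoop2A l1 l2 b2s c a2 a1
      = (a2.find? (fun i => !(a1.contains i))).map
          (fun i => (String.ofList (l1.take i ++ [if l1.getD i ' ' = '0' then '1' else '0'] ++ l1.drop (i + 1)), b2s, -1 * c)) := by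
  intro a2
  induction a2 with
  | nil => intro a1; simp [pvLoop2A]
  | cons i rest ih =>
    intro a1
    simp only [pvLoop2A, List.find?_cons]
    by_cases h : i ∈ a1 <;> simp [h, ih]

lemma diff_empty_iff (l : List (Nat × Char × Char)) :
    (l.filterMap pvGd).length = 0 ↔ l.any pvPd = false := by
  rw [List.length_eq_zero_iff, List.filterMap_eq_nil_iff]
  constructor
  · intro h
    simp only [List.any_eq_false]
    intro x hx
    have := h x hx
    simp only [pvGd] at this
    simp only [pvPd]
    split at this
    · cases this
    · rename_i hc
      push_neg at hc
      by_cases e1 : x.2.1 = '-' <;> by_cases e2 : x.2.2 = '-' <;> simp_all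
  · intro h x hx
    have := List.any_eq_false.1 h x hx
    simp only [pvPd] at this
    simp only [pvGd]
    split
    · rename_i hc
      exfalso
      by_cases e1 : x.2.1 = '-' <;> by_cases e2 : x.2.2 = '-' <;> simp_all [hc.2]
    · rfl

-- ===== VERDICT (by name: the statement is the Claim_ definition above) =====
theorem resolve_conflicts_spec : Claim_equal_resolve_conflicts := by
  intro bits1 bits2 coeff _
  unfold Spec_resolve_conflicts resolve_conflicts resolve_conflicts_alt
  simp only [foldA_char, foldB_char, List.nil_append]
  by_cases hd : (pvEnum 0 (bits1.toList.zip bits2.toList)).any pvPd = true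
  · have hlen : ((pvEnum 0 (bits1.toList.zip bits2.toList)).filterMap pvGd).length ≠ 0 := by
      intro h
      rw [diff_empty_iff] at h
      simp [h] at hd
    simp [hd, hlen]
  · have hpd : (pvEnum 0 (bits1.toList.zip bits2.toList)).any pvPd = false := by
      simpa using hd
    have hlen : ((pvEnum 0 (bits1.toList.zip bits2.toList)).filterMap pvGd).length = 0 :=
      (diff_empty_iff _).2 hpd
    rw [loop1_eq_find, loop2_eq_find, key1, key2]
    cases hf1 : ((pvEnum 0 (bits1.toList.zip bits2.toList)).find? pvQ1) with
    | some x => simp [hpd, hlen]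
    | none =>
      cases hf2 : ((pvEnum 0 (bits1.toList.zip bits2.toList)).find? pvQ2) with
      | some x => simp [hpd, hlen]
      | none => simp [hpd, hlen]
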